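-- pv_equiv track=rewrite | github.com/Ahajsan/Text-Algorithms | lab_2/z_algorithm.py | z_pattern_match
-- ===== SOURCE A (Python) =====
-- def compute_z_array(s: str) -> list[int]:
--     """
--     Compute the Z array for a string.
--
--     The Z array Z[i] gives the length of the longest substring starting at position i
--     that is also a prefix of the string.
--
--     Args:
--         s: The input string
--
--     Returns:
--         The Z array for the string
--     """
--     # TODO: Implement the Z-array computation
--     # For each position i:
--     # - Calculate the length of the longest substring starting at i that is also a prefix of s
--     # - Use the Z-box technique to avoid redundant character comparisons
--     # - Handle the cases when i is inside or outside the current Z-box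
--
--     n = len(s)
--     z = [0] * n
--     l, r = 0, 0
--
--     for i in range(1, n):
--         if i <= r:
--             z[i] = min(r - i + 1, z[i - l])
--
--         while i + z[i] < n and s[z[i]] == s[i + z[i]]:
--             z[i] += 1
--
--         if i + z[i] - 1 > r:
--             l, r = i, i + z[i] - 1
--
--     return z
--
-- def z_pattern_match(text: str, pattern: str) -> list[int]:
--     """
--     Use the Z algorithm to find all occurrences of a pattern in a text.
--
--     Args:
--         text: The text to search in
--         pattern: The pattern to search for
--
--     Returns:
--         A list of starting positions (0-indexed) where the pattern was found in the text
--     """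
--     # TODO: Implement pattern matching using the Z algorithm
--     # 1. Create a concatenated string: pattern + special_character + text
--     # 2. Compute the Z array for this concatenated string
--     # 3. Find positions where Z[i] equals the pattern length
--     # 4. Convert these positions in the concatenated string to positions in the original text
--     # 5. Return all positions where the pattern is found in the text
--     if pattern == "" or text == "":
--         return []
--
--     additional_text = "###"
--     concatenated = pattern + additional_text + text
--     Z = compute_z_array(concatenated)
--     result = []
--     n = len(pattern)
--     cnst = len(pattern) + len(additional_text)
--
--     for i in range(len(Z)):
--         if Z[i] == n:
--             result.append(i - cnst)
--
--     return result
-- ===== SOURCE B (Python) =====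
-- def z_pattern_match(text: str, pattern: str) -> list[int]:
--     if pattern == "" or text == "":
--         return []
--     s = pattern + "###" + text
--     n = len(pattern)
--     off = n + 3
--     result = []
--     for i in range(len(s)):
--         k = 0
--         while i + k < len(s) and s[k] == s[i + k]:
--             k += 1
--         if k == n:
--             result.append(i - off)
--     return result
-- ===== Notes on version B (the rewrite author's own statement) =====
-- stated objective: simpler
-- what changed: B keeps A's sentinel concatenation but replaces the Z-box incremental Z-array (state l,r, min-shortcut, stored array) by a direct per-position prefix-scan: for each position it recomputes the longest common prefix with the string by a plain character loop and emits the offset when it equals len(pattern).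
import Mathlib
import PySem

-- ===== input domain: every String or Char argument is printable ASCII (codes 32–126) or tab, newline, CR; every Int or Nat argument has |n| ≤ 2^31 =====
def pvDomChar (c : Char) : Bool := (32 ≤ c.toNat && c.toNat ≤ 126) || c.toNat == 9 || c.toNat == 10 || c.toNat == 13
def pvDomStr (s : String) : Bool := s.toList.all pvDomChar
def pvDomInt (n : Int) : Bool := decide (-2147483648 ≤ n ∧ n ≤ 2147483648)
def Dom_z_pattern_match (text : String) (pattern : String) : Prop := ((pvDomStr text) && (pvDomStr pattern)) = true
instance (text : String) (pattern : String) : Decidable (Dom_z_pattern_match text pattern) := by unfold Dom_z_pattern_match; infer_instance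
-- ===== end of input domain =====

-- B replaces A's Z-box incremental Z-array computation by a direct per-position prefix scan
-- over the same sentinel concatenation (objective: simpler; not faster).

-- ===== PORT A =====
-- A's inner `while i + z[i] < n and s[z[i]] == s[i + z[i]]: z[i] += 1`, started at k = z[i].
-- Indices are in range whenever read (short-circuit guard), so getD is exact.
def zWhileA (s : List Char) (i k : Nat) : Nat :=
  if h : i + k < s.length then
    if s.getD k ' ' = s.getD (i + k) ' ' then zWhileA s i (k + 1) else k
  else k
termination_by s.length - (i + k)
decreasing_by omega

-- the body of A's `for i in range(1, n)` loop; state is (z, l, r)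
def zStepA (s : List Char) (st : List Nat × Nat × Nat) (i : Nat) : List Nat × Nat × Nat :=
  let z := st.1
  let l := st.2.1
  let r := st.2.2
  let z := if i ≤ r then z.set i (min (r - i + 1) (z.getD (i - l) 0)) else z
  let k := zWhileA s i (z.getD i 0)
  let z := z.set i k
  if r < i + k - 1 then (z, i, i + k - 1) else (z, l, r)

def compute_z_arrayA (s : List Char) : List Nat :=
  let n := s.length
  ((List.range' 1 (n - 1)).foldl (zStepA s) (List.replicate n 0, 0, 0)).1

def z_pattern_match (text : String) (pattern : String) : List Int :=
  if pattern = "" ∨ text = "" then []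
  else
    let s := pattern.toList ++ "###".toList ++ text.toList
    let Z := compute_z_arrayA s
    let n := pattern.toList.length
    let cnst := pattern.toList.length + "###".toList.length
    (List.range Z.length).foldl
      (fun acc i => if Z.getD i 0 = n then acc ++ [(i : Int) - (cnst : Int)] else acc) []

-- ===== PORT B =====
-- B's inner `while i + k < len(s) and s[k] == s[i + k]: k += 1`
def lcpScanB (s : List Char) (i k : Nat) : Nat :=
  if h : i + k < s.length then
    if s.getD k ' ' = s.getD (i + k) ' ' then lcpScanB s i (k + 1) else k
  else k
termination_by s.length - (i + k)
decreasing_by omega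

def z_pattern_match_alt (text : String) (pattern : String) : List Int :=
  if pattern = "" ∨ text = "" then []
  else
    let s := pattern.toList ++ "###".toList ++ text.toList
    let n := pattern.toList.length
    let off := n + 3
    (List.range s.length).foldl
      (fun acc i =>
        let k := lcpScanB s i 0
        if k = n then acc ++ [(i : Int) - (off : Int)] else acc) []

-- ===== PRECONDITION & SPEC =====
def Spec_z_pattern_match (text : String) (pattern : String) (out : List Int) : Prop := out = z_pattern_match_alt text pattern
instance (text : String) (pattern : String) (out : List Int) : Decidable (Spec_z_pattern_match text pattern out) := by unfold Spec_z_pattern_match; infer_instance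

-- ===== CLAIM (what is proved, stated in full; the proofs are below) =====
def Claim_equal_z_pattern_match : Prop := ∀ (text : String) (pattern : String), Dom_z_pattern_match text pattern → Spec_z_pattern_match text pattern (z_pattern_match text pattern)

-- ===== LEMMAS AND PROOFS =====

-- `Match s i k`: the first k characters starting at i match the prefix, all in range
def ZMatch (s : List Char) (i k : Nat) : Prop :=
  ∀ j, j < k → i + j < s.length ∧ s.getD j ' ' = s.getD (i + j) ' '

theorem zWhileA_eq_lcpScanB (s : List Char) (i k : Nat) : zWhileA s i k = lcpScanB s i k := by
  rw [zWhileA, lcpScanB]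
  split
  · split
    · exact zWhileA_eq_lcpScanB s i (k + 1)
    · rfl
  · rfl
termination_by s.length - (i + k)
decreasing_by omega

theorem le_lcpScanB (s : List Char) (i k : Nat) : k ≤ lcpScanB s i k := by
  rw [lcpScanB]
  split
  · split
    · exact le_trans (by omega) (le_lcpScanB s i (k + 1))
    · exact le_refl k
  · exact le_refl k
termination_by s.length - (i + k)
decreasing_by omega

theorem zmatch_lcpScanB (s : List Char) (i k : Nat) (h : ZMatch s i k) :
    ZMatch s i (lcpScanB s i k) := by
  rw [lcpScanB]
  split
  · split
    · refine zmatch_lcpScanB s i (k + 1) ?_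
      intro j hj
      rcases Nat.lt_or_ge j k with hjk | hjk
      · exact h j hjk
      · have : j = k := by omega
        subst this
        exact ⟨by omega, by assumption⟩
    · exact h
  · exact h
termination_by s.length - (i + k)
decreasing_by omega

theorem lcpScanB_of_zmatch (s : List Char) (i k a : Nat) (ha : a ≤ k) (h : ZMatch s i k) :
    lcpScanB s i a = lcpScanB s i k := by
  rcases Nat.eq_or_lt_of_le ha with heq | hlt
  · rw [heq]
  · obtain ⟨h1, h2⟩ := h a hlt
    rw [lcpScanB]
    rw [dif_pos h1, if_pos h2]
    exact lcpScanB_of_zmatch s i k (a + 1) hlt h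
termination_by k - a
decreasing_by omega

-- the Z-box shortcut is sound: the min start value is all-matching
theorem zbox_short (s : List Char) (l i r : Nat) (hli : l ≤ i) (hir : i ≤ r)
    (hbox : r + 1 ≤ l + lcpScanB s l 0) :
    ZMatch s i (min (r - i + 1) (lcpScanB s (i - l) 0)) := by
  intro j hj
  have h1 : j < lcpScanB s (i - l) 0 := lt_of_lt_of_le hj (min_le_right _ _)
  have h2 : i + j ≤ r := by
    have := lt_of_lt_of_le hj (min_le_left _ _); omega
  have hm1 := zmatch_lcpScanB s (i - l) 0 (by intro j hj; omega)
  obtain ⟨hlt1, heq1⟩ := hm1 j h1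
  have hm2 := zmatch_lcpScanB s l 0 (by intro j hj; omega)
  have ht : (i - l) + j < lcpScanB s l 0 := by omega
  obtain ⟨hlt2, heq2⟩ := hm2 ((i - l) + j) ht
  have hidx : l + ((i - l) + j) = i + j := by omega
  refine ⟨by omega, ?_⟩
  rw [heq1]
  rw [heq2, hidx]

-- getD/set bookkeeping
theorem getD_set_self (z : List Nat) (a m : Nat) (h : a < z.length) :
    (z.set a m).getD a 0 = m := by
  simp [List.getD_eq_getElem?_getD, h]

theorem getD_set_ne (z : List Nat) (a j m : Nat) (h : j ≠ a) :
    (z.set a m).getD j 0 = z.getD j 0 := by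
  simp [List.getD_eq_getElem?_getD, Ne.symm h]

theorem getD_replicate_zero (n j : Nat) : (List.replicate n (0 : Nat)).getD j 0 = 0 := by
  rcases Nat.lt_or_ge j n with h | h
  · simp [List.getD_eq_getElem?_getD, h]
  · have hnone : (List.replicate n (0 : Nat))[j]? = none :=
      List.getElem?_eq_none (by simpa using h)
    simp [List.getD_eq_getElem?_getD, hnone]

-- the loop invariant after processing indices 1 .. a-1
def ZInv (s : List Char) (a : Nat) (st : List Nat × Nat × Nat) : Prop :=
  st.1.length = s.length ∧
  (∀ j, 1 ≤ j → j < a → st.1.getD j 0 = lcpScanB s j 0) ∧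
  (∀ j, j = 0 ∨ a ≤ j → st.1.getD j 0 = 0) ∧
  ((st.2.1 = 0 ∧ st.2.2 = 0) ∨
    (1 ≤ st.2.1 ∧ st.2.1 < a ∧ st.2.2 + 1 ≤ st.2.1 + lcpScanB s st.2.1 0))

theorem zinv_step (s : List Char) (a : Nat) (st : List Nat × Nat × Nat)
    (ha : 1 ≤ a) (han : a < s.length) (hinv : ZInv s a st) :
    ZInv s (a + 1) (zStepA s st a) := by
  obtain ⟨hlen, hdone, hzero, hbox⟩ := hinv
  obtain ⟨z, l, r⟩ := st
  simp only at hlen hdone hzero hbox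
  -- the value written at index a is lcpScanB s a 0, in both branches
  have key : ∀ z1 : List Nat, z1 = (if a ≤ r then z.set a (min (r - a + 1) (z.getD (a - l) 0)) else z) →
      zWhileA s a (z1.getD a 0) = lcpScanB s a 0 ∧ (∀ j, j ≠ a → z1.getD j 0 = z.getD j 0) ∧ z1.length = z.length := by
    intro z1 hz1
    by_cases hr : a ≤ r
    · rw [if_pos hr] at hz1
      rcases hbox with ⟨hl0, hr0⟩ | ⟨hl1, hla, hbx⟩
      · omega
      · have hzl : z.getD (a - l) 0 = lcpScanB s (a - l) 0 :=
          hdone (a - l) (by omega) (by omega)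
        have hm : ZMatch s a (min (r - a + 1) (lcpScanB s (a - l) 0)) :=
          zbox_short s l a r (by omega) hr hbx
        have hle : min (r - a + 1) (lcpScanB s (a - l) 0) ≤ lcpScanB s a (min (r - a + 1) (lcpScanB s (a - l) 0)) :=
          le_lcpScanB _ _ _
        subst hz1
        have hget : (z.set a (min (r - a + 1) (z.getD (a - l) 0))).getD a 0
            = min (r - a + 1) (lcpScanB s (a - l) 0) := by
          rw [getD_set_self _ _ _ (by omega), hzl]
        refine ⟨?_, ?_, by simp⟩
        · rw [hget, zWhileA_eq_lcpScanB]
          exact (lcpScanB_of_zmatch s a _ 0 (by omega) hm).symm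

        · intro j hj; exact getD_set_ne z a j _ hj
    · rw [if_neg hr] at hz1
      subst hz1
      refine ⟨?_, fun j _ => rfl, rfl⟩
      rw [hzero a (Or.inr (le_refl a)), zWhileA_eq_lcpScanB]
  obtain ⟨hk, hother, hlen1⟩ := key _ rfl
  unfold zStepA
  simp only
  set z1 := (if a ≤ r then z.set a (min (r - a + 1) (z.getD (a - l) 0)) else z) with hz1def
  set k := zWhileA s a (z1.getD a 0) with hkdef
  have hk' : k = lcpScanB s a 0 := hk
  have hcore : ZInv s (a + 1) (z1.set a k, a, a + k - 1) ∧ ZInv s (a + 1) (z1.set a k, l, r) := by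
    have hlenz : (z1.set a k).length = s.length := by
      rw [List.length_set, hlen1, hlen]
    have hdone' : ∀ j, 1 ≤ j → j < a + 1 → (z1.set a k).getD j 0 = lcpScanB s j 0 := by
      intro j h1 h2
      rcases Nat.lt_or_ge j a with hja | hja
      · rw [getD_set_ne _ _ _ _ (by omega), hother j (by omega)]
        exact hdone j h1 hja
      · have : j = a := by omega
        subst this
        rw [getD_set_self _ _ _ (by omega), hk']
    have hzero' : ∀ j, j = 0 ∨ a + 1 ≤ j → (z1.set a k).getD j 0 = 0 := by
      intro j hj
      rw [getD_set_ne _ _ _ _ (by omega), hother j (by omega)]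
      exact hzero j (by omega)
    constructor
    · refine ⟨hlenz, hdone', hzero', Or.inr ?_⟩
      show 1 ≤ a ∧ a < a + 1 ∧ (a + k - 1) + 1 ≤ a + lcpScanB s a 0
      rw [hk']
      refine ⟨ha, by omega, by omega⟩
    · refine ⟨hlenz, hdone', hzero', ?_⟩
      show (l = 0 ∧ r = 0) ∨ (1 ≤ l ∧ l < a + 1 ∧ r + 1 ≤ l + lcpScanB s l 0)
      rcases hbox with ⟨hl0, hr0⟩ | ⟨hl1, hla, hbx⟩
      · exact Or.inl ⟨hl0, hr0⟩
      · exact Or.inr ⟨hl1, by omega, hbx⟩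
  split
  · exact hcore.1
  · exact hcore.2

theorem zinv_fold (s : List Char) (m a : Nat) (st : List Nat × Nat × Nat)
    (ha : 1 ≤ a) (ham : a + m ≤ s.length) (hinv : ZInv s a st) :
    ZInv s (a + m) (List.foldl (zStepA s) st (List.range' a m)) := by
  induction m generalizing a st with
  | zero => simpa using hinv
  | succ m ih =>
    rw [List.range'_succ, List.foldl_cons]
    have := ih (a + 1) (zStepA s st a) (by omega) (by omega)
      (zinv_step s a st ha (by omega) hinv)
    have harith : a + 1 + m = a + (m + 1) := by omega
    rwa [harith] at this

theorem z_array_inv (s : List Char) (hs : 1 ≤ s.length) :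
    ZInv s s.length ((List.range' 1 (s.length - 1)).foldl (zStepA s) (List.replicate s.length 0, 0, 0)) := by
  have h0 : ZInv s 1 (List.replicate s.length 0, 0, 0) := by
    refine ⟨by simp, by intro j h1 h2; omega, ?_, Or.inl ⟨rfl, rfl⟩⟩
    intro j _
    exact getD_replicate_zero _ _
  have := zinv_fold s (s.length - 1) 1 _ (le_refl 1) (by omega) h0
  have harith : 1 + (s.length - 1) = s.length := by omega
  rwa [harith] at this

-- for i = 0 the scan matches everything: lcp at 0 is the full length
theorem lcpScanB_zero (s : List Char) (k : Nat) (hk : k ≤ s.length) :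
    lcpScanB s 0 k = s.length := by
  rw [lcpScanB]
  split
  · rw [if_pos (by simp_all)]
    exact lcpScanB_zero s (k + 1) (by omega)
  · omega
termination_by s.length - k
decreasing_by omega

theorem nonempty_toList (s : String) (h : s ≠ "") : 1 ≤ s.toList.length := by
  rcases hl : s.toList with _ | ⟨c, cs⟩
  · exact absurd (String.toList_eq_nil_iff.mp hl) h
  · simp

-- ===== VERDICT (by name: the statement is the Claim_ definition above) =====
theorem z_pattern_match_spec : Claim_equal_z_pattern_match := by
  intro text pattern _
  unfold Spec_z_pattern_match z_pattern_match z_pattern_match_alt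
  split
  · rfl
  · rename_i hguard
    rw [not_or] at hguard
    obtain ⟨hp, ht⟩ := hguard
    simp only
    set s := pattern.toList ++ "###".toList ++ text.toList with hsdef
    have hp1 : 1 ≤ pattern.toList.length := nonempty_toList pattern hp
    have ht1 : 1 ≤ text.toList.length := nonempty_toList text ht
    have hslen : s.length = pattern.toList.length + 3 + text.toList.length := by
      simp [hsdef]; omega
    have hs1 : 1 ≤ s.length := by omega
    have hinv := z_array_inv s hs1
    obtain ⟨hlen, hdone, hzero, _⟩ := hinv
    have hZlen : (compute_z_arrayA s).length = s.length := by
      unfold compute_z_arrayA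
      exact hlen
    rw [hZlen]
    rw [PySem.List.foldl_append_ite, PySem.List.foldl_append_ite]
    congr 1
    have hfilter : List.filter (fun i => decide ((compute_z_arrayA s).getD i 0 = pattern.toList.length)) (List.range s.length)
        = List.filter (fun i => decide (lcpScanB s i 0 = pattern.toList.length)) (List.range s.length) := by
      apply List.filter_congr
      intro i hi
      have hiN : i < s.length := List.mem_range.mp hi
      rcases Nat.eq_zero_or_pos i with h0 | hpos
      · subst h0
        have hA : (compute_z_arrayA s).getD 0 0 = 0 := by
          unfold compute_z_arrayA; exact hzero 0 (Or.inl rfl)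
        have hB : lcpScanB s 0 0 = s.length := lcpScanB_zero s 0 (by omega)
        rw [hA, hB]
        simp only [decide_eq_decide]
        omega
      · have hA : (compute_z_arrayA s).getD i 0 = lcpScanB s i 0 := by
          unfold compute_z_arrayA; exact hdone i hpos hiN
        rw [hA]
    rw [hfilter]
    apply List.map_congr_left
    intro i _
    have : ("###".toList.length : Nat) = 3 := by decide
    rw [this]
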